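-- pv_equiv track=rewrite | github.com/krolikladoshka/solveit | yandex/lektionvier.py | checknumbers1
-- ===== SOURCE A (Python) =====
-- def checknumbers1(a, b):
--     def cgnums(val):
--         digits = [0] * 10
--
--         while val != 0:
--             digits[val % 10] += 1
--             val //= 10
--         return digits
--
--     for a, b in zip(cgnums(a), cgnums(b)):
--         if a != b:
--             return False
--     return True
-- ===== SOURCE B (Python) =====
-- def checknumbers1(a, b):
--     def cgnums(val):
--         digits = []
--         while val != 0:
--             digits.append(val % 10)
--             val //= 10
--         return digits
--
--     return sorted(cgnums(a)) == sorted(cgnums(b))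
-- ===== Notes on version B (the rewrite author's own statement) =====
-- stated objective: simpler
-- what changed: replaces the two length-10 histogram arrays and the element-wise zip comparison with extracting each number's digit list and comparing the two sorted digit lists
import Mathlib
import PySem

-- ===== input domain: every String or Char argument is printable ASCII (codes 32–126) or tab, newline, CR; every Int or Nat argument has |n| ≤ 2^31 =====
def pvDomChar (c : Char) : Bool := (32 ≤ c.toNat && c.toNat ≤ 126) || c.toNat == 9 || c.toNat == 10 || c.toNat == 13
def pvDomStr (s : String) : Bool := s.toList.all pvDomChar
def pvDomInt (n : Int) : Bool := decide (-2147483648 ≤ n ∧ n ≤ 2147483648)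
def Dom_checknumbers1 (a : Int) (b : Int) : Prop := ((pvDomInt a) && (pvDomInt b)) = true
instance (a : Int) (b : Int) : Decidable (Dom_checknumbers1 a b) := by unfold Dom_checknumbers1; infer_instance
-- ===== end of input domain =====

-- B compares the sorted digit lists instead of A's length-10 histogram tables ("simpler").
-- NOTE: both Pythons diverge identically on negative inputs (`val //= 10` stalls at -1);
-- the ports stop via fuel there and still agree, so the equivalence is stated on all of Dom.

-- ===== PORT A =====
-- `while val != 0: digits[val % 10] += 1; val //= 10` — fuel only makes the loop total;
-- 64 steps suffice for every |val| ≤ 2^31 ≥ 0 (at most 10 digits).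
def cgnumsA (fuel : Nat) (val : Int) (digits : List Int) : List Int :=
  match fuel with
  | 0 => digits
  | fuel + 1 =>
    if val = 0 then digits
    else
      let i := (PySem.Int.mod val 10).toNat
      cgnumsA fuel (PySem.Int.floordiv val 10) (digits.set i (digits.getD i 0 + 1))

def checknumbers1 (a : Int) (b : Int) : Bool :=
  ((cgnumsA 64 a (List.replicate 10 0)).zip (cgnumsA 64 b (List.replicate 10 0))).all
    (fun p => p.1 == p.2)

-- ===== PORT B =====
-- `while val != 0: digits.append(val % 10); val //= 10`, then sorted(...) == sorted(...)
def cgnumsB (fuel : Nat) (val : Int) (digits : List Int) : List Int :=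
  match fuel with
  | 0 => digits
  | fuel + 1 =>
    if val = 0 then digits
    else cgnumsB fuel (PySem.Int.floordiv val 10) (digits ++ [PySem.Int.mod val 10])

def checknumbers1_alt (a : Int) (b : Int) : Bool :=
  PySem.List.sorted (cgnumsB 64 a []) (fun x => x) false
    == PySem.List.sorted (cgnumsB 64 b []) (fun x => x) false

-- ===== PRECONDITION & SPEC =====
def Spec_checknumbers1 (a : Int) (b : Int) (out : Bool) : Prop := out = checknumbers1_alt a b
instance (a : Int) (b : Int) (out : Bool) : Decidable (Spec_checknumbers1 a b out) := by
  unfold Spec_checknumbers1; infer_instance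

-- ===== CLAIM (what is proved, stated in full; the proofs are below) =====
def Claim_equal_checknumbers1 : Prop :=
  ∀ (a : Int) (b : Int), Dom_checknumbers1 a b → Spec_checknumbers1 a b (checknumbers1 a b)

-- ===== LEMMAS AND PROOFS =====

-- the pure digit sequence both loops traverse: low digit first
def digSeq (fuel : Nat) (val : Int) : List Int :=
  match fuel with
  | 0 => []
  | fuel + 1 =>
    if val = 0 then []
    else PySem.Int.mod val 10 :: digSeq fuel (PySem.Int.floordiv val 10)

theorem cgnumsB_eq_append (fuel : Nat) :
    ∀ (val : Int) (acc : List Int), cgnumsB fuel val acc = acc ++ digSeq fuel val := by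
  induction fuel with
  | zero => intro val acc; simp [cgnumsB, digSeq]
  | succ n ih =>
    intro val acc
    by_cases h : val = 0
    · simp [cgnumsB, digSeq, h]
    · simp [cgnumsB, digSeq, h, ih]

theorem digSeq_mem_range (fuel : Nat) :
    ∀ (val : Int), ∀ d ∈ digSeq fuel val, 0 ≤ d ∧ d < 10 := by
  induction fuel with
  | zero => intro val d hd; simp [digSeq] at hd
  | succ n ih =>
    intro val d hd
    by_cases h : val = 0
    · simp [digSeq, h] at hd
    · simp only [digSeq, if_neg h, List.mem_cons] at hd
      rcases hd with rfl | hd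
      · exact ⟨PySem.Int.mod_nonneg val (by norm_num), PySem.Int.mod_lt val (by norm_num)⟩
      · exact ih _ d hd

-- A's loop, expressed as repeated bumps along digSeq
def bump (digits : List Int) : List Int → List Int
  | [] => digits
  | d :: L => bump (digits.set d.toNat (digits.getD d.toNat 0 + 1)) (d :: L).tail

theorem cgnumsA_eq_bump (fuel : Nat) :
    ∀ (val : Int) (digits : List Int), cgnumsA fuel val digits = bump digits (digSeq fuel val) := by
  induction fuel with
  | zero => intro val digits; simp [cgnumsA, digSeq, bump]
  | succ n ih =>
    intro val digits
    by_cases h : val = 0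
    · simp [cgnumsA, digSeq, h, bump]
    · simp [cgnumsA, digSeq, h, ih, bump]

theorem bump_length (L : List Int) : ∀ (digits : List Int), (bump digits L).length = digits.length := by
  induction L with
  | nil => intro digits; simp [bump]
  | cons d L ih => intro digits; simp [bump, ih]

theorem bump_get (L : List Int) : ∀ (digits : List Int) (i : Nat), i < digits.length →
    (∀ d ∈ L, 0 ≤ d ∧ d < (digits.length : Int)) →
    (bump digits L).getD i 0 = digits.getD i 0 + L.count (i : Int) := by
  induction L with
  | nil => intro digits i hi _; simp [bump]
  | cons d L ih =>
    intro digits i hi hrange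
    have hd := hrange d (by simp)
    have hdt : d.toNat < digits.length := by omega
    have hcast : (d.toNat : Int) = d := by omega
    rw [show bump digits (d :: L) = bump (digits.set d.toNat (digits.getD d.toNat 0 + 1)) L from rfl]
    rw [ih _ i (by simpa using hi) (by simpa using fun x hx => hrange x (List.mem_cons_of_mem _ hx))]
    have hset : (digits.set d.toNat (digits.getD d.toNat 0 + 1)).getD i 0
        = if d.toNat = i then digits.getD i 0 + 1 else digits.getD i 0 := by
      have hi' : i < (digits.set d.toNat (digits.getD d.toNat 0 + 1)).length := by simpa using hi
      rw [List.getD_eq_getElem _ 0 hi', List.getElem_set]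
      by_cases hdi : d.toNat = i
      · simp [hdi]
      · simp [hdi, (List.getD_eq_getElem _ 0 hi).symm]
    rw [hset]
    by_cases hdi : d.toNat = i
    · have : (i : Int) = d := by omega
      simp [hdi, this]
      ring
    · have hne : d ≠ (i : Int) := by omega
      simp [hdi, hne]

-- A's result membership test ↔ counts of every digit 0..9 agree
theorem zip_all_eq_iff (xs : List Int) : ∀ ys : List Int, xs.length = ys.length →
    (((xs.zip ys).all fun p => p.1 == p.2) = true ↔ xs = ys) := by
  induction xs with
  | nil => intro ys h; cases ys with
    | nil => simp
    | cons y ys => simp at h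
  | cons x xs ih =>
    intro ys h
    cases ys with
    | nil => simp at h
    | cons y ys =>
      simp only [List.zip_cons_cons, List.all_cons, Bool.and_eq_true, beq_iff_eq, List.cons.injEq]
      exact and_congr Iff.rfl (ih ys (by simpa using h))

theorem count_eq_zero_of_out (L : List Int) (hL : ∀ d ∈ L, 0 ≤ d ∧ d < 10) (x : Int)
    (hx : ¬ (0 ≤ x ∧ x < 10)) : L.count x = 0 := by
  rw [List.count_eq_zero]
  intro hmem
  exact hx (hL x hmem)

theorem counts_iff_perm (L1 L2 : List Int) (h1 : ∀ d ∈ L1, 0 ≤ d ∧ d < 10)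
    (h2 : ∀ d ∈ L2, 0 ≤ d ∧ d < 10) :
    (∀ i : Nat, i < 10 → L1.count (i : Int) = L2.count (i : Int)) ↔ L1.Perm L2 := by
  constructor
  · intro h
    rw [List.perm_iff_count]
    intro x
    by_cases hx : 0 ≤ x ∧ x < 10
    · have : x = ((x.toNat : Nat) : Int) := by omega
      rw [this]
      exact h x.toNat (by omega)
    · rw [count_eq_zero_of_out L1 h1 x hx, count_eq_zero_of_out L2 h2 x hx]
  · intro h i _
    exact List.Perm.count_eq h _

theorem perm_iff_sorted_eq (L1 L2 : List Int) :
    L1.Perm L2 ↔ PySem.List.sorted L1 (fun x => x) false = PySem.List.sorted L2 (fun x => x) false := by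
  constructor
  · intro h
    apply PySem.List.sorted_id_eq_of_perm_of_pairwise
    · exact (PySem.List.sorted_perm L2 (fun x => x) false).trans (h.symm)
    · simpa using PySem.List.sorted_pairwise (xs := L2) (key := fun x => x)
  · intro h
    have p1 := PySem.List.sorted_perm L1 (fun x => x) false
    have p2 := PySem.List.sorted_perm L2 (fun x => x) false
    exact (p1.symm.trans (h ▸ p2 : (PySem.List.sorted L1 (fun x => x) false).Perm L2))

-- histograms equal ↔ digit lists are permutations
theorem hist_eq_iff_perm (L1 L2 : List Int) (h1 : ∀ d ∈ L1, 0 ≤ d ∧ d < 10)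
    (h2 : ∀ d ∈ L2, 0 ≤ d ∧ d < 10) :
    bump (List.replicate 10 0) L1 = bump (List.replicate 10 0) L2 ↔ L1.Perm L2 := by
  rw [← counts_iff_perm L1 L2 h1 h2]
  constructor
  · intro h i hi
    have hlen : i < (List.replicate 10 (0:Int)).length := by simpa using hi
    have g1 := bump_get L1 (List.replicate 10 0) i hlen (by simpa using h1)
    have g2 := bump_get L2 (List.replicate 10 0) i hlen (by simpa using h2)
    have : (bump (List.replicate 10 0) L1).getD i 0 = (bump (List.replicate 10 0) L2).getD i 0 := by
      rw [h]
    rw [g1, g2] at this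
    omega
  · intro h
    apply List.ext_getElem (by simp [bump_length])
    intro i hi hi2
    have hlen : i < (List.replicate 10 (0:Int)).length := by
      have := hi; rw [bump_length] at this; simpa using this
    have g1 := bump_get L1 (List.replicate 10 0) i hlen (by simpa using h1)
    have g2 := bump_get L2 (List.replicate 10 0) i hlen (by simpa using h2)
    rw [List.getD_eq_getElem _ 0 hi] at g1
    rw [List.getD_eq_getElem _ 0 hi2] at g2
    rw [g1, g2, h i (by simpa using hlen)]

-- ===== VERDICT (by name: the statement is the Claim_ definition above) =====
theorem checknumbers1_spec : Claim_equal_checknumbers1 := by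
  intro a b _
  unfold Spec_checknumbers1 checknumbers1 checknumbers1_alt
  rw [cgnumsA_eq_bump, cgnumsA_eq_bump, cgnumsB_eq_append, cgnumsB_eq_append]
  simp only [List.nil_append]
  have h1 := digSeq_mem_range 64 a
  have h2 := digSeq_mem_range 64 b
  have hlen : (bump (List.replicate 10 0) (digSeq 64 a)).length
            = (bump (List.replicate 10 0) (digSeq 64 b)).length := by simp [bump_length]
  rw [Bool.eq_iff_iff]
  rw [zip_all_eq_iff _ _ hlen, beq_iff_eq]
  rw [hist_eq_iff_perm _ _ h1 h2, perm_iff_sorted_eq]
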